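-- pv_equiv track=rewrite | github.com/chroma-core/chroma | rust/index/benches/scripts/ingest_100m_quantized_spann.py | _contiguous_prefix_end
-- ===== SOURCE A (Python) =====
-- from typing import Any, Dict, List, Optional, Sequence, Tuple
--
-- def _merge_intervals(
--     intervals: List[Tuple[int, int]],
-- ) -> List[Tuple[int, int]]:
--     if not intervals:
--         return []
--     intervals = sorted(intervals)
--     merged: List[List[int]] = [[intervals[0][0], intervals[0][1]]]
--     for start, end in intervals[1:]:
--         if start <= merged[-1][1]:
--             merged[-1][1] = max(merged[-1][1], end)
--         else:
--             merged.append([start, end])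
--     return [(a, b) for a, b in merged]
--
-- def _contiguous_prefix_end(intervals: Sequence[Tuple[int, int]]) -> int:
--     """Largest W such that [0, W) is covered by merged intervals."""
--     merged = _merge_intervals(list(intervals))
--     w = 0
--     for start, end in merged:
--         if start > w:
--             break
--         w = max(w, end)
--     return w
-- ===== SOURCE B (Python) =====
-- def _contiguous_prefix_end(intervals):
--     """Largest W such that [0, W) is covered by merged intervals."""
--     w = 0
--     for start, end in sorted(list(intervals)):
--         if start > w:
--             break
--         w = max(w, end)
--     return w
-- ===== Notes on version B (the rewrite author's own statement) =====
-- stated objective: simpler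
-- what changed: B drops the merge pass entirely: one sorted pass with a reach-from-0 accumulator (w = max(w,end) while start <= w) replaces the merge-intervals-then-scan two-pass structure.
import Mathlib
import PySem

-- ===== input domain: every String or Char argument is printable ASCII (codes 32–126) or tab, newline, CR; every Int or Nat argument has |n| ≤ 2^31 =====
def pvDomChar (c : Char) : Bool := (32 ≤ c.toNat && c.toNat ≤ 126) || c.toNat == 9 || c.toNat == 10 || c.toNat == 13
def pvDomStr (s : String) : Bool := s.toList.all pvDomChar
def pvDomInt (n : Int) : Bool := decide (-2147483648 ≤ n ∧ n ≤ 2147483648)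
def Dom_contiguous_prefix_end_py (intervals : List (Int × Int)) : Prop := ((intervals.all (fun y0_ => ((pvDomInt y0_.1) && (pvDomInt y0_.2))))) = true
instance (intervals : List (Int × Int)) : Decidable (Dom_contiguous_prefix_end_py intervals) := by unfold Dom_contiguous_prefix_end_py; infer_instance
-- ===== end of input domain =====

-- B replaces A's merge-intervals-then-scan two-pass structure with one loop over the sorted
-- intervals maintaining the reach-from-0 accumulator w (simpler; same return value).


-- ===== PORT A =====
-- _merge_intervals loop: 'cur' is merged[-1], extended in place or flushed
def pvMergeGo (cur : Int × Int) : List (Int × Int) → List (Int × Int)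
  | [] => [cur]
  | (s, e) :: rest =>
    if s ≤ cur.2 then pvMergeGo (cur.1, max cur.2 e) rest
    else cur :: pvMergeGo (s, e) rest

def pvMergeIntervals (intervals : List (Int × Int)) : List (Int × Int) :=
  match PySem.List.sorted2 intervals (fun p => p.1) (fun p => p.2) with
  | [] => []
  | c :: rest => pvMergeGo c rest

-- the 'for start, end in merged' loop with its break
def pvScanA (w : Int) : List (Int × Int) → Int
  | [] => w
  | (s, e) :: rest => if s > w then w else pvScanA (max w e) rest

def contiguous_prefix_end_py (intervals : List (Int × Int)) : Int :=
  pvScanA 0 (pvMergeIntervals intervals)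

-- ===== PORT B =====
-- B's single loop over sorted(list(intervals)) with break
def pvScanB (w : Int) : List (Int × Int) → Int
  | [] => w
  | (s, e) :: rest => if s > w then w else pvScanB (max w e) rest

def contiguous_prefix_end_py_alt (intervals : List (Int × Int)) : Int :=
  pvScanB 0 (PySem.List.sorted2 intervals (fun p => p.1) (fun p => p.2))

-- ===== PRECONDITION & SPEC =====
def Spec_contiguous_prefix_end_py (intervals : List (Int × Int)) (out : Int) : Prop := out = contiguous_prefix_end_py_alt intervals
instance (intervals : List (Int × Int)) (out : Int) : Decidable (Spec_contiguous_prefix_end_py intervals out) := by unfold Spec_contiguous_prefix_end_py; infer_instance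

-- ===== CLAIM (what is proved, stated in full; the proofs are below) =====
def Claim_equal_contiguous_prefix_end_py : Prop := ∀ (intervals : List (Int × Int)), Dom_contiguous_prefix_end_py intervals → Spec_contiguous_prefix_end_py intervals (contiguous_prefix_end_py intervals)

-- ===== LEMMAS AND PROOFS =====
-- scanning a merged tail is the same as scanning the raw tail (no ordering needed)
theorem pvScanA_mergeGo (l : List (Int × Int)) : ∀ (cur : Int × Int) (w : Int),
    pvScanA w (pvMergeGo cur l) = pvScanA w (cur :: l) := by
  induction l with
  | nil => intro cur w; rfl
  | cons p rest ih =>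
    intro cur w
    obtain ⟨s, e⟩ := p
    obtain ⟨c1, c2⟩ := cur
    by_cases hs : s ≤ c2
    · simp only [pvMergeGo, hs, if_pos, ih]
      simp only [pvScanA]
      by_cases hw : c1 > w
      · simp [hw]
      · have : ¬ s > max w c2 := by omega
        simp [hw, this, max_assoc]
    · simp only [pvMergeGo, hs, if_neg, not_false_iff]
      simp only [pvScanA, ih]

theorem pvScanA_eq_pvScanB (l : List (Int × Int)) : ∀ w, pvScanA w l = pvScanB w l := by
  induction l with
  | nil => intro w; rfl
  | cons p rest ih =>
    intro w; obtain ⟨s, e⟩ := p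
    simp only [pvScanA, pvScanB, ih]

-- ===== VERDICT (by name: the statement is the Claim_ definition above) =====
theorem contiguous_prefix_end_py_spec : Claim_equal_contiguous_prefix_end_py := by
  intro intervals _
  unfold Spec_contiguous_prefix_end_py contiguous_prefix_end_py contiguous_prefix_end_py_alt
    pvMergeIntervals
  cases h : PySem.List.sorted2 intervals (fun p => p.1) (fun p => p.2) with
  | nil => rfl
  | cons c rest => rw [pvScanA_mergeGo, pvScanA_eq_pvScanB]
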